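-- pv_equiv track=rewrite | github.com/sayymeoww/coding | OPT/lomonosov/task 2/task 2.py | convert
-- ===== SOURCE A (Python) =====
-- def convert(s : str) -> dict:
--     d = dict()
--
--     temp = 0
--     for c in s:
--         if c.isdigit():
--             temp = 10 * temp + int(c)
--         else:
--             if c in d:
--                 d[c] += temp
--             else:
--                 d[c] = temp
--             temp = 0
--
--     return d
-- ===== SOURCE B (Python) =====
-- def convert(s : str) -> dict:
--     # split s into maximal runs of same isdigit-class, then process run by run
--     runs = []
--     i = 0
--     n = len(s)
--     while i < n:
--         k = s[i].isdigit()
--         j = i + 1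
--         while j < n and s[j].isdigit() == k:
--             j += 1
--         runs.append((k, s[i:j]))
--         i = j
--     d = {}
--     temp = 0
--     for k, g in runs:
--         if k:
--             for c in g:
--                 temp = 10 * temp + int(c)
--         else:
--             d[g[0]] = d.get(g[0], 0) + temp
--             for c in g[1:]:
--                 d[c] = d.get(c, 0)
--             temp = 0
--     return d
-- ===== Notes on version B (the rewrite author's own statement) =====
-- stated objective: alternative
-- what changed: B first splits the string into maximal digit/non-digit runs, then folds each digit run into the pending number and credits it to the first character of the following non-digit run (subsequent run characters just get 0), instead of A's single per-character loop with branch-local dict updates.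
import Mathlib
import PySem

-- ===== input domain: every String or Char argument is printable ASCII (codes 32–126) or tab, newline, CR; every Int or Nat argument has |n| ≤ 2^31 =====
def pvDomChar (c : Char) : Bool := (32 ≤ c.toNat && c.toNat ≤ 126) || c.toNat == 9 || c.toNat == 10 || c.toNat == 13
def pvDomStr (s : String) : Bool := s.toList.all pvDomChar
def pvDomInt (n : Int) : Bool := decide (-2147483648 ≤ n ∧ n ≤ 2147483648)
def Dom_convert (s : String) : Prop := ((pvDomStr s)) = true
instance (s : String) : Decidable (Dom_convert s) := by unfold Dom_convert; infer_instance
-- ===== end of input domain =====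

-- B changes the decomposition: it processes maximal digit / non-digit runs instead of single characters.

-- ===== PORT A =====
-- int(c) is ported as (c.toNat - 48 : Int): exact for the ASCII digit characters the isdigit
-- branch selects inside Dom_convert (printable ASCII / tab / newline / CR).
def convertStep (st : PySem.Dict String Int × Int) (c : Char) : PySem.Dict String Int × Int :=
  if PySem.Chars.isdigit c then
    (st.1, 10 * st.2 + ((c.toNat : Int) - 48))
  else
    (if st.1.contains (String.ofList [c]) then
       st.1.insert (String.ofList [c]) (((st.1.get? (String.ofList [c])).getD 0) + st.2)
     else
       st.1.insert (String.ofList [c]) st.2, 0)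

def convert (s : String) : List (String × Int) :=
  (s.toList.foldl convertStep (PySem.Dict.empty, 0)).1.items

-- ===== PORT B =====
-- maximal runs of characters of the same isdigit-class (Source B's run-splitting loop)
def convertRuns (l : List Char) : List (Bool × List Char) :=
  match l with
  | [] => []
  | c :: rest =>
    (PySem.Chars.isdigit c,
      c :: rest.takeWhile (fun x => PySem.Chars.isdigit x == PySem.Chars.isdigit c)) ::
    convertRuns (rest.dropWhile (fun x => PySem.Chars.isdigit x == PySem.Chars.isdigit c))
termination_by l.length
decreasing_by
  simp only [List.length_cons]
  exact Nat.lt_succ_of_le (List.length_dropWhile_le _ _)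

-- temp = 10 * temp + int(c)   (int(c) as for the A port: exact on Dom's ASCII digits)
def convertNum (t : Int) (c : Char) : Int := 10 * t + ((c.toNat : Int) - 48)

-- d[c] = d.get(c, 0) + t
def convertAdd (d : PySem.Dict String Int) (c : Char) (t : Int) : PySem.Dict String Int :=
  d.insert (String.ofList [c]) (d.getD (String.ofList [c]) 0 + t)

def convertApplyRun (st : PySem.Dict String Int × Int) (r : Bool × List Char) :
    PySem.Dict String Int × Int :=
  if r.1 then (st.1, r.2.foldl convertNum st.2)
  else
    match r.2 with
    | [] => st   -- unreachable: runs are nonempty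
    | c0 :: g => (g.foldl (fun d c => convertAdd d c 0) (convertAdd st.1 c0 st.2), 0)

def convert_alt (s : String) : List (String × Int) :=
  ((convertRuns s.toList).foldl convertApplyRun (PySem.Dict.empty, 0)).1.items

-- ===== PRECONDITION & SPEC =====
def Spec_convert (s : String) (out : List (String × Int)) : Prop := out = convert_alt s
instance (s : String) (out : List (String × Int)) : Decidable (Spec_convert s out) := by
  unfold Spec_convert; infer_instance

-- ===== CLAIM (what is proved, stated in full; the proofs are below) =====
def Claim_equal_convert : Prop := ∀ (s : String), Dom_convert s → Spec_convert s (convert s)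

-- ===== LEMMAS AND PROOFS =====

theorem convert_stepA_digit (st : PySem.Dict String Int × Int) (c : Char)
    (h : PySem.Chars.isdigit c = true) : convertStep st c = (st.1, convertNum st.2 c) := by
  simp [convertStep, convertNum, h]

theorem convert_stepA_nondigit (st : PySem.Dict String Int × Int) (c : Char)
    (h : PySem.Chars.isdigit c = false) : convertStep st c = (convertAdd st.1 c st.2, 0) := by
  simp only [convertStep, convertAdd, h, Bool.false_eq_true, if_false]
  by_cases hc : st.1.contains (String.ofList [c]) = true
  · simp [hc, PySem.Dict.getD_eq_get?_getD]
  · simp [hc, PySem.Dict.getD_of_not_contains _ _ (by simpa using hc)]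

theorem convert_foldl_digits (g : List Char) (h : ∀ x ∈ g, PySem.Chars.isdigit x = true)
    (d : PySem.Dict String Int) (t : Int) :
    g.foldl convertStep (d, t) = (d, g.foldl convertNum t) := by
  induction g generalizing t with
  | nil => rfl
  | cons c g ih =>
    simp only [List.foldl_cons]
    rw [convert_stepA_digit _ _ (h c (by simp))]
    exact ih (fun x hx => h x (by simp [hx])) _

theorem convert_foldl_nondigits (g : List Char) (h : ∀ x ∈ g, PySem.Chars.isdigit x = false)
    (d : PySem.Dict String Int) :
    g.foldl convertStep (d, 0) = (g.foldl (fun d c => convertAdd d c 0) d, 0) := by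
  induction g generalizing d with
  | nil => rfl
  | cons c g ih =>
    simp only [List.foldl_cons]
    rw [convert_stepA_nondigit _ _ (h c (by simp))]
    exact ih (fun x hx => h x (by simp [hx])) _

theorem convert_run_eq (c : Char) (g : List Char)
    (hg : ∀ x ∈ g, PySem.Chars.isdigit x = PySem.Chars.isdigit c)
    (st : PySem.Dict String Int × Int) :
    convertApplyRun st (PySem.Chars.isdigit c, c :: g) = (c :: g).foldl convertStep st := by
  cases h : PySem.Chars.isdigit c with
  | true =>
    simp only [convertApplyRun, if_true, List.foldl_cons]
    rw [convert_stepA_digit _ _ h,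
      convert_foldl_digits g (fun x hx => (hg x hx).trans h) st.1 (convertNum st.2 c)]
  | false =>
    simp only [convertApplyRun, Bool.false_eq_true, if_false, List.foldl_cons]
    rw [convert_stepA_nondigit _ _ h,
      convert_foldl_nondigits g (fun x hx => (hg x hx).trans h) (convertAdd st.1 c st.2)]

theorem convert_main (n : Nat) : ∀ (l : List Char), l.length ≤ n →
    ∀ (st : PySem.Dict String Int × Int),
    (convertRuns l).foldl convertApplyRun st = l.foldl convertStep st := by
  induction n with
  | zero =>
    intro l hl st
    have : l = [] := List.length_eq_zero_iff.mp (Nat.le_zero.mp hl)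
    subst this; rw [convertRuns]; rfl
  | succ n ih =>
    intro l hl st
    cases l with
    | nil => rw [convertRuns]; rfl
    | cons c rest =>
      rw [convertRuns]
      simp only [List.foldl_cons]
      have hsplit : rest.takeWhile (fun x => PySem.Chars.isdigit x == PySem.Chars.isdigit c) ++
          rest.dropWhile (fun x => PySem.Chars.isdigit x == PySem.Chars.isdigit c) = rest :=
        List.takeWhile_append_dropWhile
      have hg : ∀ x ∈ rest.takeWhile (fun x => PySem.Chars.isdigit x == PySem.Chars.isdigit c),
          PySem.Chars.isdigit x = PySem.Chars.isdigit c := by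
        intro x hx
        have := List.mem_takeWhile_imp hx
        simpa using this
      have hlen : (rest.dropWhile
          (fun x => PySem.Chars.isdigit x == PySem.Chars.isdigit c)).length ≤ n := by
        have h1 := List.length_dropWhile_le
          (fun x => PySem.Chars.isdigit x == PySem.Chars.isdigit c) rest
        have h2 : rest.length ≤ n := by simpa using Nat.le_of_succ_le_succ (by simpa using hl)
        omega
      rw [ih _ hlen, convert_run_eq c _ hg st]
      calc ((rest.dropWhile (fun x => PySem.Chars.isdigit x == PySem.Chars.isdigit c)).foldl
              convertStep ((c :: rest.takeWhile
                (fun x => PySem.Chars.isdigit x == PySem.Chars.isdigit c)).foldl convertStep st))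
          = ((c :: rest.takeWhile (fun x => PySem.Chars.isdigit x == PySem.Chars.isdigit c)) ++
              rest.dropWhile (fun x => PySem.Chars.isdigit x == PySem.Chars.isdigit c)).foldl
              convertStep st := (List.foldl_append ..).symm
        _ = (c :: rest).foldl convertStep st := by rw [List.cons_append, hsplit]

-- ===== VERDICT (by name: the statement is the Claim_ definition above) =====
theorem convert_spec : Claim_equal_convert := by
  intro s _
  unfold Spec_convert convert convert_alt
  rw [convert_main s.toList.length s.toList (le_refl _)]
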